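-- pv_equiv track=rewrite | github.com/roy35-909/CP | Beautiful Year.py | isDistinct
-- ===== SOURCE A (Python) =====
-- def isDistinct(intt):
--     n = str(intt)
--     arr=[]
--     result = True
--     for i in n:
--         for j in arr:
--             if i==j:
--                 result= False
--         arr.append(i)
--
--     return result
-- ===== SOURCE B (Python) =====
-- def isDistinct(intt):
--     n = str(intt)
--     return len(set(n)) == len(n)
-- ===== Notes on version B (the rewrite author's own statement) =====
-- stated objective: idiomatic
-- what changed: The nested duplicate-detection loop over an accumulator list is replaced by building the set of characters once and comparing its cardinality with the string length.
import Mathlib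
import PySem

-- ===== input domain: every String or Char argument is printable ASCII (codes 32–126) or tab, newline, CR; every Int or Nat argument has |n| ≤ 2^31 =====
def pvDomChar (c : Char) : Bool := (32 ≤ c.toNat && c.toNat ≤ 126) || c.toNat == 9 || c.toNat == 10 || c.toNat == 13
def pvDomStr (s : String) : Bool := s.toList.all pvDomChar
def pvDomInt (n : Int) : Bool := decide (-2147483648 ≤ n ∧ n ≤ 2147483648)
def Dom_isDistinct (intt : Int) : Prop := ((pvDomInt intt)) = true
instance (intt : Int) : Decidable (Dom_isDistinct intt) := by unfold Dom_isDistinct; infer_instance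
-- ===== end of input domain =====

-- B replaces A's nested scan over an accumulator with one set-cardinality comparison (idiomatic).

-- ===== PORT A =====
-- n = str(intt); arr = []; result = True; for i in n: (for j in arr: if i==j: result=False); arr.append(i)
def isDistinct (intt : Int) : Bool :=
  let n := (PySem.Int.toStr intt).toList
  let st := n.foldl
    (fun (s : List Char × Bool) i =>
      (s.1 ++ [i], s.1.foldl (fun r j => if i == j then false else r) s.2))
    ([], true)
  st.2

-- ===== PORT B =====
-- return len(set(n)) == len(n)
def isDistinct_alt (intt : Int) : Bool :=
  let n := (PySem.Int.toStr intt).toList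
  (PySem.Set.ofList n).length == n.length

-- ===== PRECONDITION & SPEC =====
def Spec_isDistinct (intt : Int) (out : Bool) : Prop := out = isDistinct_alt intt
instance (intt : Int) (out : Bool) : Decidable (Spec_isDistinct intt out) := by unfold Spec_isDistinct; infer_instance

-- ===== CLAIM (what is proved, stated in full; the proofs are below) =====
def Claim_equal_isDistinct : Prop := ∀ (intt : Int), Dom_isDistinct intt → Spec_isDistinct intt (isDistinct intt)

-- ===== LEMMAS AND PROOFS =====

-- A's inner loop over arr: result stays res unless i occurs in arr.
lemma inner_foldl (i : Char) (arr : List Char) (res : Bool) :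
    arr.foldl (fun r j => if i == j then false else r) res = (res && !(arr.contains i)) := by
  induction arr generalizing res with
  | nil => simp
  | cons a l ih =>
      rw [List.foldl_cons, ih]
      by_cases h : i = a
      · simp [h]
      · simp [h]

-- A's outer loop invariant.
lemma outer_foldl (l arr : List Char) (res : Bool) :
    (l.foldl
      (fun (s : List Char × Bool) i =>
        (s.1 ++ [i], s.1.foldl (fun r j => if i == j then false else r) s.2))
      (arr, res)).2
    = (res && decide (l.Nodup ∧ ∀ x ∈ l, x ∉ arr)) := by
  induction l generalizing arr res with
  | nil => simp
  | cons a l ih =>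
      simp only [List.foldl_cons]
      rw [ih, inner_foldl]
      cases res with
      | false => simp
      | true =>
          simp only [Bool.true_and]
          rw [Bool.eq_iff_iff]
          simp only [Bool.and_eq_true, Bool.not_eq_true', List.contains_eq_mem,
            decide_eq_true_eq, decide_eq_false_iff_not, List.nodup_cons, List.mem_cons,
            List.mem_append, 
            List.not_mem_nil, or_false]
          constructor
          · rintro ⟨hna, hnd, hmem⟩
            refine ⟨⟨fun hx => (hmem a hx (Or.inr rfl)), hnd⟩, ?_⟩
            rintro x (rfl | hx)
            · exact hna
            · exact fun hc => hmem x hx (Or.inl hc)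
          · rintro ⟨⟨hnal, hnd⟩, hmem⟩
            refine ⟨hmem a (Or.inl rfl), hnd, ?_⟩
            rintro x hx (hc | rfl)
            · exact hmem x (Or.inr hx) hc
            · exact hnal hx

-- B's test: |set(n)| = |n| iff n has no duplicate characters.
lemma ofList_length_eq_iff (l : List Char) :
    ((PySem.Set.ofList l).length = l.length) ↔ l.Nodup := by
  have hperm : (PySem.Set.ofList l).Perm l.dedup := by
    refine (List.perm_ext_iff_of_nodup ?_ l.nodup_dedup).mpr ?_
    · exact PySem.Set.nodup_ofList l
    · intro x
      rw [PySem.Set.mem_ofList, List.mem_dedup]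
  rw [hperm.length_eq]
  constructor
  · intro h
    exact List.dedup_eq_self.mp ((l.dedup_sublist).eq_of_length h)
  · intro h
    rw [List.dedup_eq_self.mpr h]

-- ===== VERDICT (by name: the statement is the Claim_ definition above) =====
theorem isDistinct_spec : Claim_equal_isDistinct := by
  intro intt _
  unfold Spec_isDistinct isDistinct isDistinct_alt
  simp only [outer_foldl, Bool.true_and]
  rw [Bool.eq_iff_iff]
  simp [ofList_length_eq_iff]
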